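-- pv_equiv track=rewrite | github.com/kidonrage/ai_labs | AI_2/project/main.py | strip_leading_markdown_heading
-- ===== SOURCE A (Python) =====
-- def strip_leading_markdown_heading(text):
--     """Remove the first markdown heading from a section body."""
--     lines = str(text or "").splitlines()
--     if not lines:
--         return ""
--
--     first_non_empty_index = None
--     for index, line in enumerate(lines):
--         if line.strip():
--             first_non_empty_index = index
--             break
--
--     if first_non_empty_index is None:
--         return ""
--
--     if lines[first_non_empty_index].lstrip().startswith("#"):
--         lines = lines[first_non_empty_index + 1 :]
--     else:
--         lines = lines[first_non_empty_index:]
--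
--     return "\n".join(lines).strip()
-- ===== SOURCE B (Python) =====
-- def strip_leading_markdown_heading(text):
--     """Remove the first markdown heading from a section body."""
--     s = "\n".join(str(text or "").splitlines()).lstrip()
--     if not s.startswith("#"):
--         return s.rstrip()
--     i = s.find("\n")
--     return "" if i == -1 else s[i + 1:].strip()
-- ===== Notes on version B (the rewrite author's own statement) =====
-- stated objective: idiomatic
-- what changed: A scans splitlines output with an index loop, slices the line list and re-joins; B never builds per-line state: it normalizes once with join(splitlines), lstrips the whole string, and drops one heading line via a single find of the first newline and a slice.
import Mathlib
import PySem

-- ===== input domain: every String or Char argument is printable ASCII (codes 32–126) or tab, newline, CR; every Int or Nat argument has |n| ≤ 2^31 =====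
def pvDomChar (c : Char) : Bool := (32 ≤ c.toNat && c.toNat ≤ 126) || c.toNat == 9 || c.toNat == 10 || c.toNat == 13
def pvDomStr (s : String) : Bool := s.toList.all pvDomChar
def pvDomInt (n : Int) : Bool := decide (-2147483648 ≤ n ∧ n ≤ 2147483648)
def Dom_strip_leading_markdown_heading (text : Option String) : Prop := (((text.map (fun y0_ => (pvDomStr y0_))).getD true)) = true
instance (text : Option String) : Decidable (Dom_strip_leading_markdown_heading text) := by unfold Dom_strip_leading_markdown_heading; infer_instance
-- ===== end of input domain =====

-- B rewrites A's line-indexed scan/slice as direct string operations (lstrip, one find of '\n', one slice); same result, no claim of speed.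

-- ===== PORT A =====
-- Port of A: splitlines, find the first non-blank line with a for/break loop (findIdx?),
-- test it for a leading '#', slice the line list there, join and strip.
-- `lines[first_non_empty_index]` is in range whenever the loop found an index, so pyGet? ∘ getD "" is exact.
def strip_leading_markdown_heading (text : Option String) : String :=
  let lines := PySem.Str.splitlines (text.getD "")
  if lines.isEmpty then ""
  else
    match lines.findIdx? (fun line => PySem.Str.strip line != "") with
    | none => ""
    | some first_non_empty_index =>
      let lines2 :=
        if PySem.Str.startswith
            (PySem.Str.lstrip ((PySem.List.pyGet? lines (first_non_empty_index : Int)).getD "")) "#"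
        then PySem.List.slice lines (some ((first_non_empty_index : Int) + 1)) none
        else PySem.List.slice lines (some (first_non_empty_index : Int)) none
      PySem.Str.strip (PySem.Str.join "\n" lines2)

-- ===== PORT B =====
def strip_leading_markdown_heading_alt (text : Option String) : String :=
  let s := PySem.Str.lstrip (PySem.Str.join "\n" (PySem.Str.splitlines (text.getD "")))
  if !PySem.Str.startswith s "#" then
    PySem.Str.rstrip s
  else
    let i := PySem.Str.find s "\n"
    if i = -1 then "" else PySem.Str.strip (PySem.Str.slice s (some (i + 1)) none)

-- ===== PRECONDITION & SPEC =====
def Spec_strip_leading_markdown_heading (text : Option String) (out : String) : Prop := out = strip_leading_markdown_heading_alt text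
instance (text : Option String) (out : String) : Decidable (Spec_strip_leading_markdown_heading text out) := by unfold Spec_strip_leading_markdown_heading; infer_instance

-- ===== CLAIM (what is proved, stated in full; the proofs are below) =====
def Claim_equal_strip_leading_markdown_heading : Prop := ∀ (text : Option String), Dom_strip_leading_markdown_heading text → Spec_strip_leading_markdown_heading text (strip_leading_markdown_heading text)

-- ===== LEMMAS AND PROOFS =====

-- No piece produced by splitlines.go contains a break character.
theorem pv_go_noB (isB : Char → Bool) (s cur : List Char) (acc : List (List Char)) :
    (∀ c ∈ cur, isB c = false) → (∀ l ∈ acc, ∀ c ∈ l, isB c = false) →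
    ∀ l ∈ PySem.Chars.splitlines.go isB s cur acc, ∀ c ∈ l, isB c = false := by
  fun_induction PySem.Chars.splitlines.go isB s cur acc <;> intro h1 h2
  · simpa using h2
  · intro l hl
    simp only [List.mem_reverse, List.mem_cons] at hl
    rcases hl with h | h
    · subst h; simpa using h1
    · exact h2 l (by simpa using h)
  case case3 ih =>
    apply ih
    · simp
    · intro l hl
      rcases List.mem_cons.1 hl with h | h
      · subst h; simpa using h1
      · exact h2 l h
  case case4 ih =>
    apply ih
    · simp
    · intro l hl
      rcases List.mem_cons.1 hl with h | h
      · subst h; simpa using h1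
      · exact h2 l h
  case case5 c rest cur acc _ hc ih =>
    apply ih
    · intro d hd
      rcases List.mem_cons.1 hd with h | h
      · subst h; simpa using hc
      · exact h1 d h
    · exact h2

-- No line produced by splitlines contains a newline.
theorem pv_splitlines_no_newline (t : List Char) :
    ∀ l ∈ PySem.Chars.splitlines t, ('\n' : Char) ∉ l := by
  intro l hl hmem
  have h := pv_go_noB _ t [] [] (by simp) (by simp) l
      (by simpa [PySem.Chars.splitlines] using hl) _ hmem
  simp at h

-- blank test: strip l = [] ↔ lstrip l = []
theorem pv_strip_nil_iff (l : List Char) :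
    PySem.Chars.strip l = [] ↔ PySem.Chars.lstrip l = [] := by
  constructor
  · intro h
    by_contra hne
    have hne' : List.dropWhile PySem.Chars.isspace l ≠ [] := hne
    have hc := List.head_dropWhile_not PySem.Chars.isspace (l := l) hne'
    have hmem : (List.dropWhile PySem.Chars.isspace l).head hne' ∈ PySem.Chars.lstrip l := by
      exact List.head_mem hne'
    have hall : ∀ x ∈ (PySem.Chars.lstrip l).reverse, PySem.Chars.isspace x = true := by
      have h' : List.dropWhile PySem.Chars.isspace (PySem.Chars.lstrip l).reverse = [] := by
        simpa [PySem.Chars.strip, PySem.Chars.rstrip] using h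
      exact List.dropWhile_eq_nil_iff.1 h'
    have htrue := hall _ (List.mem_reverse.2 hmem)
    simp [htrue] at hc
  · intro h
    unfold PySem.Chars.strip
    rw [h]
    simp [PySem.Chars.rstrip]

theorem pv_lstrip_append_blank (a b : List Char) (h : PySem.Chars.lstrip a = []) :
    PySem.Chars.lstrip (a ++ b) = PySem.Chars.lstrip b := by
  have h' : List.dropWhile PySem.Chars.isspace a = [] := by simpa [PySem.Chars.lstrip] using h
  simp [PySem.Chars.lstrip, List.dropWhile_append, h']

theorem pv_lstrip_append_nonblank (a b : List Char) (h : PySem.Chars.lstrip a ≠ []) :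
    PySem.Chars.lstrip (a ++ b) = PySem.Chars.lstrip a ++ b := by
  have h' : (List.dropWhile PySem.Chars.isspace a).isEmpty = false := by
    rw [List.isEmpty_eq_false_iff]
    simpa [PySem.Chars.lstrip] using h
  simp [PySem.Chars.lstrip, List.dropWhile_append, h']

theorem pv_startswith_append (a b : List Char) (h : a ≠ []) :
    PySem.Chars.startswith (a ++ b) ['#'] = PySem.Chars.startswith a ['#'] := by
  obtain ⟨c, r, rfl⟩ := List.exists_cons_of_ne_nil h
  simp [PySem.Chars.startswith, List.isPrefixOf]

theorem pv_find_nl_none (s : List Char) (h : ('\n' : Char) ∉ s) :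
    PySem.Chars.find s ['\n'] = -1 := by
  rw [PySem.Chars.find_eq_neg_one_iff]
  rw [List.singleton_infix_iff]
  exact h

theorem pv_find_nl_append (a b : List Char) (h : ('\n' : Char) ∉ a) :
    PySem.Chars.find (a ++ '\n' :: b) ['\n'] = (a.length : Int) := by
  have hinf : ['\n'] <:+: (a ++ '\n' :: b) := by
    rw [List.singleton_infix_iff]; simp
  have h0 : 0 ≤ PySem.Chars.find (a ++ '\n' :: b) ['\n'] :=
    (PySem.Chars.find_nonneg_iff _ _).2 hinf
  obtain ⟨hpre, hmin⟩ := PySem.Chars.find_spec h0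
  set k := (PySem.Chars.find (a ++ '\n' :: b) ['\n']).toNat with hk
  have hle : k ≤ a.length := by
    by_contra hgt
    exact hmin a.length (by omega) (by simp)
  have hk_eq : k = a.length := by
    rcases Nat.lt_or_ge k a.length with hlt | hge
    · exfalso
      have hdrop : List.drop k (a ++ '\n' :: b) = List.drop k a ++ '\n' :: b := by
        simp [List.drop_append, Nat.sub_eq_zero_of_le (Nat.le_of_lt hlt)]
      rw [hdrop] at hpre
      obtain ⟨t, ht⟩ := hpre
      have hne : List.drop k a ≠ [] := by
        intro hnil
        have hlen := congrArg List.length hnil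
        simp [List.length_drop] at hlen
        omega
      obtain ⟨c, r, hcr⟩ := List.exists_cons_of_ne_nil hne
      rw [hcr] at ht
      simp at ht
      apply h
      have : c ∈ a := by
        have : c ∈ List.drop k a := by simp [hcr]
        exact List.mem_of_mem_drop this
      rwa [← ht.1] at this
    · omega
  omega

-- the Chars-level core equivalence
theorem pv_lstrip_no_newline (l : List Char) (h : ('\n' : Char) ∉ l) :
    ('\n' : Char) ∉ PySem.Chars.lstrip l := by
  intro hm
  exact h (List.Sublist.mem hm (List.dropWhile_sublist _))

theorem pv_lstrip_nl : PySem.Chars.lstrip ['\n'] = [] := by decide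

-- the Chars-level core equivalence
theorem pv_core_eq (ls : List (List Char)) (h : ∀ l ∈ ls, ('\n' : Char) ∉ l) :
    (match ls.findIdx? (fun l => !decide (PySem.Chars.strip l = [])) with
      | none => ([] : List Char)
      | some i =>
          PySem.Chars.strip (PySem.Chars.join ['\n']
            (if PySem.Chars.startswith (PySem.Chars.lstrip (ls.getD i [])) ['#']
             then ls.drop (i+1) else ls.drop i)))
    = (if !PySem.Chars.startswith (PySem.Chars.lstrip (PySem.Chars.join ['\n'] ls)) ['#'] then
         PySem.Chars.rstrip (PySem.Chars.lstrip (PySem.Chars.join ['\n'] ls))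
       else if PySem.Chars.find (PySem.Chars.lstrip (PySem.Chars.join ['\n'] ls)) ['\n'] = -1 then []
       else PySem.Chars.strip (PySem.Chars.slice
              (PySem.Chars.lstrip (PySem.Chars.join ['\n'] ls))
              (some (PySem.Chars.find (PySem.Chars.lstrip (PySem.Chars.join ['\n'] ls)) ['\n'] + 1)) none)) := by
  induction ls with
  | nil =>
    simp [PySem.Chars.join_nil, PySem.Chars.lstrip, PySem.Chars.rstrip,
          PySem.Chars.startswith]
  | cons l rs ih =>
    have hl : ('\n' : Char) ∉ l := h l (by simp)
    have hrs : ∀ x ∈ rs, ('\n' : Char) ∉ x := fun x hx => h x (by simp [hx])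
    by_cases hb : PySem.Chars.strip l = []
    · -- first line blank: both sides ignore it
      have hbl : PySem.Chars.lstrip l = [] := (pv_strip_nil_iff l).1 hb
      have hjoin : PySem.Chars.lstrip (PySem.Chars.join ['\n'] (l :: rs))
          = PySem.Chars.lstrip (PySem.Chars.join ['\n'] rs) := by
        cases rs with
        | nil =>
          rw [PySem.Chars.join_singleton, PySem.Chars.join_nil, hbl]
          rfl
        | cons r rs' =>
          rw [PySem.Chars.join_cons_cons, List.append_assoc,
              pv_lstrip_append_blank _ _ hbl,
              show ('\n' :: [] : List Char) ++ PySem.Chars.join ['\n'] (r :: rs')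
                = ['\n'] ++ PySem.Chars.join ['\n'] (r :: rs') from rfl,
              pv_lstrip_append_blank _ _ pv_lstrip_nl]
      rw [hjoin]
      have hpl : (!decide (PySem.Chars.strip l = [])) = false := by simp [hb]
      rw [List.findIdx?_cons]
      simp only [hpl, Bool.false_eq_true, if_false]
      cases hfi : rs.findIdx? (fun l => !decide (PySem.Chars.strip l = [])) with
      | none =>
        rw [hfi] at ih
        simpa using ih hrs
      | some i =>
        rw [hfi] at ih
        have := ih hrs
        simpa [List.getD_cons_succ, List.drop_succ_cons] using this
    · -- first line non-blank
      have hbl : PySem.Chars.lstrip l ≠ [] := fun hh => hb ((pv_strip_nil_iff l).2 hh)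
      have hpl : (!decide (PySem.Chars.strip l = [])) = true := by simp [hb]
      rw [List.findIdx?_cons]
      simp only [hpl, if_true, List.getD_cons_zero, List.drop_succ_cons, List.drop_zero]
      have hnl' : ('\n' : Char) ∉ PySem.Chars.lstrip l := pv_lstrip_no_newline l hl
      cases rs with
      | nil =>
        have hs : PySem.Chars.lstrip (PySem.Chars.join ['\n'] [l]) = PySem.Chars.lstrip l := by
          rw [PySem.Chars.join_singleton]
        rw [hs]
        by_cases hst : PySem.Chars.startswith (PySem.Chars.lstrip l) ['#'] = true
        · rw [hst, pv_find_nl_none _ hnl']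
          simp [PySem.Chars.join_nil, PySem.Chars.strip, PySem.Chars.lstrip, PySem.Chars.rstrip]
        · rw [Bool.not_eq_true] at hst
          rw [hst]
          simp only [Bool.not_false, if_true, Bool.false_eq_true, if_false]
          rw [PySem.Chars.join_singleton]
          rfl
      | cons r rs' =>
        have hs : PySem.Chars.lstrip (PySem.Chars.join ['\n'] (l :: r :: rs'))
            = PySem.Chars.lstrip l ++ ('\n' :: PySem.Chars.join ['\n'] (r :: rs')) := by
          rw [PySem.Chars.join_cons_cons, List.append_assoc,
              pv_lstrip_append_nonblank _ _ hbl]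
          rfl
        rw [hs, pv_startswith_append _ _ hbl]
        by_cases hst : PySem.Chars.startswith (PySem.Chars.lstrip l) ['#'] = true
        · rw [hst]
          simp only [Bool.not_true, Bool.false_eq_true, if_false, if_true]
          rw [pv_find_nl_append _ _ hnl']
          have hne1 : ¬(((PySem.Chars.lstrip l).length : Int) = -1) := by omega
          rw [if_neg hne1]
          rw [PySem.Chars.slice_eq_listSlice,
              PySem.List.slice_from _ (show (0:Int) ≤ ((PySem.Chars.lstrip l).length : Int) + 1 by omega)]
          have hnat : ((((PySem.Chars.lstrip l).length : Int) + 1).toNat)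
              = (PySem.Chars.lstrip l).length + 1 := by omega
          rw [hnat, List.drop_append,
              List.drop_of_length_le (show (PySem.Chars.lstrip l).length ≤ (PySem.Chars.lstrip l).length + 1 by omega)]
          simp
        · rw [Bool.not_eq_true] at hst
          rw [hst]
          simp only [Bool.not_false, if_true, Bool.false_eq_true, if_false]
          rw [← hs]
          rfl

def pvCoreA (ls : List (List Char)) : List Char :=
  match ls.findIdx? (fun l => !decide (PySem.Chars.strip l = [])) with
  | none => []
  | some i =>
      PySem.Chars.strip (PySem.Chars.join ['\n']
        (if PySem.Chars.startswith (PySem.Chars.lstrip (ls.getD i [])) ['#']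
         then ls.drop (i+1) else ls.drop i))

def pvCoreB (ls : List (List Char)) : List Char :=
  if !PySem.Chars.startswith (PySem.Chars.lstrip (PySem.Chars.join ['\n'] ls)) ['#'] then
    PySem.Chars.rstrip (PySem.Chars.lstrip (PySem.Chars.join ['\n'] ls))
  else if PySem.Chars.find (PySem.Chars.lstrip (PySem.Chars.join ['\n'] ls)) ['\n'] = -1 then []
  else PySem.Chars.strip (PySem.Chars.slice
         (PySem.Chars.lstrip (PySem.Chars.join ['\n'] ls))
         (some (PySem.Chars.find (PySem.Chars.lstrip (PySem.Chars.join ['\n'] ls)) ['\n'] + 1)) none)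

theorem pv_core_eq' (ls : List (List Char)) (h : ∀ l ∈ ls, ('\n' : Char) ∉ l) :
    pvCoreA ls = pvCoreB ls := by
  unfold pvCoreA pvCoreB
  exact pv_core_eq ls h

theorem pv_pred_eq :
    (fun line => PySem.Str.strip line != "")
      = ((fun cs => !decide (PySem.Chars.strip cs = [])) ∘ String.toList) := by
  funext line
  have hiff : (PySem.Str.strip line = "") ↔ (PySem.Chars.strip line.toList = []) := by
    rw [← String.toList_inj, PySem.Str.toList_strip]
    simp
  simp only [Function.comp_apply]
  rw [Bool.eq_iff_iff]
  simp [bne_iff_ne, hiff]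

theorem pv_toList_A (text : Option String) :
    (strip_leading_markdown_heading text).toList
      = pvCoreA ((PySem.Str.splitlines (text.getD "")).map String.toList) := by
  simp only [strip_leading_markdown_heading, pvCoreA]
  rw [List.findIdx?_map, ← pv_pred_eq]
  by_cases hemp : (PySem.Str.splitlines (text.getD "")).isEmpty = true
  · rw [if_pos hemp]
    rw [List.isEmpty_iff] at hemp
    rw [hemp]
    simp
  · rw [if_neg hemp]
    cases hfi : (PySem.Str.splitlines (text.getD "")).findIdx? (fun line => PySem.Str.strip line != "") with
    | none => simp
    | some i =>
      simp only
      rw [PySem.Str.toList_strip, PySem.Str.toList_join]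
      have hget : ((PySem.List.pyGet? (PySem.Str.splitlines (text.getD "")) (i : Int)).getD "").toList
          = ((PySem.Str.splitlines (text.getD "")).map String.toList).getD i [] := by
        rw [PySem.List.pyGet?_natCast, List.getD_eq_getElem?_getD, List.getElem?_map]
        cases (PySem.Str.splitlines (text.getD ""))[i]? with
        | none => simp
        | some line => simp
      have hsw : PySem.Str.startswith
            (PySem.Str.lstrip ((PySem.List.pyGet? (PySem.Str.splitlines (text.getD "")) (i : Int)).getD "")) "#"
          = PySem.Chars.startswith
            (PySem.Chars.lstrip (((PySem.Str.splitlines (text.getD "")).map String.toList).getD i [])) ['#'] := by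
        rw [PySem.Str.startswith_eq, PySem.Str.toList_lstrip, hget]
        rfl
      have hmap : List.map String.toList
            (if PySem.Str.startswith
                (PySem.Str.lstrip ((PySem.List.pyGet? (PySem.Str.splitlines (text.getD "")) (i : Int)).getD "")) "#"
             then PySem.List.slice (PySem.Str.splitlines (text.getD "")) (some ((i : Int) + 1)) none
             else PySem.List.slice (PySem.Str.splitlines (text.getD "")) (some (i : Int)) none)
          = (if PySem.Chars.startswith
                (PySem.Chars.lstrip (((PySem.Str.splitlines (text.getD "")).map String.toList).getD i [])) ['#']
             then ((PySem.Str.splitlines (text.getD "")).map String.toList).drop (i + 1)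
             else ((PySem.Str.splitlines (text.getD "")).map String.toList).drop i) := by
        rw [apply_ite (List.map String.toList), hsw]
        have hc1 : ((i : Int) + 1) = ((i + 1 : Nat) : Int) := by push_cast; ring
        rw [hc1, PySem.List.slice_from _ (by positivity), PySem.List.slice_from _ (by positivity)]
        simp [List.map_drop]
      rw [hmap]
      rfl

theorem pv_toList_B (text : Option String) :
    (strip_leading_markdown_heading_alt text).toList
      = pvCoreB ((PySem.Str.splitlines (text.getD "")).map String.toList) := by
  simp only [strip_leading_markdown_heading_alt, pvCoreB]
  have hls : (PySem.Str.lstrip (PySem.Str.join "\n" (PySem.Str.splitlines (text.getD "")))).toList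
      = PySem.Chars.lstrip (PySem.Chars.join ['\n'] ((PySem.Str.splitlines (text.getD "")).map String.toList)) := by
    rw [PySem.Str.toList_lstrip, PySem.Str.toList_join]
    rfl
  have hsw : PySem.Str.startswith (PySem.Str.lstrip (PySem.Str.join "\n" (PySem.Str.splitlines (text.getD "")))) "#"
      = PySem.Chars.startswith (PySem.Chars.lstrip (PySem.Chars.join ['\n'] ((PySem.Str.splitlines (text.getD "")).map String.toList))) ['#'] := by
    rw [PySem.Str.startswith_eq, hls]
    rfl
  have hfind : PySem.Str.find (PySem.Str.lstrip (PySem.Str.join "\n" (PySem.Str.splitlines (text.getD "")))) "\n"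
      = PySem.Chars.find (PySem.Chars.lstrip (PySem.Chars.join ['\n'] ((PySem.Str.splitlines (text.getD "")).map String.toList))) ['\n'] := by
    rw [PySem.Str.find_eq, hls]
    rfl
  rw [apply_ite String.toList, hsw, hfind, PySem.Str.toList_rstrip, hls,
      apply_ite String.toList, PySem.Str.toList_strip, PySem.Str.toList_slice, hls]
  rfl

theorem pv_bridge (text : Option String) :
    strip_leading_markdown_heading text = strip_leading_markdown_heading_alt text := by
  rw [← String.toList_inj, pv_toList_A, pv_toList_B]
  apply pv_core_eq'
  rw [PySem.Str.splitlines_map_toList]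
  exact pv_splitlines_no_newline _

-- ===== VERDICT (by name: the statement is the Claim_ definition above) =====
theorem strip_leading_markdown_heading_spec : Claim_equal_strip_leading_markdown_heading := by
  intro text _
  show strip_leading_markdown_heading text = strip_leading_markdown_heading_alt text
  exact pv_bridge text
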